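-- pv_equiv track=rewrite | github.com/tizianocitro/ds-and-algo | array/sweet_and_savory.py | sweetAndSavory
-- ===== SOURCE A (Python) =====
-- def sweetAndSavory(dishes, target):
--     # This is important when sorting negative numbers
--     # if you want the highest negative number to be at the end of the array
--     sweets = sorted([dish for dish in dishes if dish < 0], key=abs)
--     savories = sorted([dish for dish in dishes if dish > 0])
--
--     bestPair = [0, 0]
--     bestDifference = float("inf")
--     sweetIndex, savoryIndex = 0, 0
--
--     while sweetIndex < len(sweets) and savoryIndex < len(savories):
--         sweet = sweets[sweetIndex]
--         savory = savories[savoryIndex]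
--
--         currentTarget = savory + sweet
--         if currentTarget <= target:
--             difference = target - currentTarget
--             if difference < bestDifference:
--                 bestDifference = difference
--                 bestPair = [sweet, savory]
--             savoryIndex += 1
--         else:
--             sweetIndex += 1
--
--     return bestPair
-- ===== SOURCE B (Python) =====
-- def sweetAndSavory(dishes, target):
--     # Sort sweets (negatives) ascending by value; for each savory (ascending),
--     # binary-search the largest sweet with sweet + savory <= target.
--     sweets = sorted(dish for dish in dishes if dish < 0)
--     savories = sorted(dish for dish in dishes if dish > 0)
--
--     bestPair = [0, 0]
--     bestDifference = None
--
--     for savory in savories: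
--         threshold = target - savory
--         # bisect_right(sweets, threshold), hand-written (no imports in this module)
--         lo, hi = 0, len(sweets)
--         while lo < hi:
--             mid = (lo + hi) // 2
--             if sweets[mid] <= threshold:
--                 lo = mid + 1
--             else:
--                 hi = mid
--         if lo > 0:
--             sweet = sweets[lo - 1]
--             difference = threshold - sweet
--             if bestDifference is None or difference < bestDifference:
--                 bestDifference = difference
--                 bestPair = [sweet, savory]
--
--     return bestPair
-- ===== Notes on version B (the rewrite author's own statement) =====
-- stated objective: alternative
-- what changed: Replaces the two-pointer merge over the descending-by-abs sweets and ascending savories with a per-savory binary search (bisect_right) on the value-ascending sweets list for the largest sweet with sweet + savory <= target.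
import Mathlib
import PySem

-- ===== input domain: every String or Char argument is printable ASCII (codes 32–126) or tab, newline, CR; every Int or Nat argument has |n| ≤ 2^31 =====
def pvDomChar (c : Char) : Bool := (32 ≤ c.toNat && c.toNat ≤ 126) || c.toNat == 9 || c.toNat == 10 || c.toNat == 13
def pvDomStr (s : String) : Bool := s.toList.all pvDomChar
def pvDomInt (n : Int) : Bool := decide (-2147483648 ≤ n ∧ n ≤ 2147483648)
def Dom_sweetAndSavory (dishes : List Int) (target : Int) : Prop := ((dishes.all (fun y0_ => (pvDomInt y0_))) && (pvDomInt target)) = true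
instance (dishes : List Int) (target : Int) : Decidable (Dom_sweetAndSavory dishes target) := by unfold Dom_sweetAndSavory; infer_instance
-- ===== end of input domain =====

-- B replaces A's two-pointer merge with a per-savory binary search on the value-ascending
-- sweets list; same cost class (alternative decomposition, not claimed faster).

-- ===== PORT A =====
-- A's while loop over (sweetIndex, savoryIndex) is ported as recursion on the suffixes
-- sweets[sweetIndex:] and savories[savoryIndex:]; bestDifference = float("inf") is `none`.
def sweetAndSavoryLoop (target : Int) : List Int → List Int → List Int → Option Int → List Int
  | sweet :: sweets, savory :: savories, bestPair, bestDifference =>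
      let currentTarget := savory + sweet
      if currentTarget ≤ target then
        let difference := target - currentTarget
        if (match bestDifference with | none => true | some b => decide (difference < b)) then
          sweetAndSavoryLoop target (sweet :: sweets) savories [sweet, savory] (some difference)
        else
          sweetAndSavoryLoop target (sweet :: sweets) savories bestPair bestDifference
      else
        sweetAndSavoryLoop target sweets (savory :: savories) bestPair bestDifference
  | _, _, bestPair, _ => bestPair
termination_by ss vs _ _ => ss.length + vs.length

def sweetAndSavory (dishes : List Int) (target : Int) : List Int :=
  let sweets := PySem.List.sorted (dishes.filter (fun dish => decide (dish < 0))) (fun dish => |dish|) false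
  let savories := PySem.List.sorted (dishes.filter (fun dish => decide (dish > 0))) (fun dish => dish) false
  sweetAndSavoryLoop target sweets savories [0, 0] none

-- ===== PORT B =====
-- Source B's hand-written bisect_right loop is the prelude primitive PySem.List.bisectRight
-- (same lo/hi halving); sweets[lo-1] is in range because 0 < lo ≤ len(sweets).
def altStep (sweets : List Int) (target : Int) (st : List Int × Option Int) (savory : Int) : List Int × Option Int :=
  let threshold := target - savory
  let lo := PySem.List.bisectRight sweets threshold
  if 0 < lo then
    let sweet := sweets.getD (lo - 1) 0
    let difference := threshold - sweet
    match st.2 with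
    | none => ([sweet, savory], some difference)
    | some b => if difference < b then ([sweet, savory], some difference) else st
  else st

def sweetAndSavory_alt (dishes : List Int) (target : Int) : List Int :=
  let sweets := PySem.List.sorted (dishes.filter (fun dish => decide (dish < 0))) (fun dish => dish) false
  let savories := PySem.List.sorted (dishes.filter (fun dish => decide (dish > 0))) (fun dish => dish) false
  (savories.foldl (altStep sweets target) ([0, 0], none)).1

-- ===== PRECONDITION & SPEC =====
def Spec_sweetAndSavory (dishes : List Int) (target : Int) (out : List Int) : Prop := out = sweetAndSavory_alt dishes target
instance (dishes : List Int) (target : Int) (out : List Int) : Decidable (Spec_sweetAndSavory dishes target out) := by unfold Spec_sweetAndSavory; infer_instance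

-- ===== CLAIM (what is proved, stated in full; the proofs are below) =====
def Claim_equal_sweetAndSavory : Prop := ∀ (dishes : List Int) (target : Int), Dom_sweetAndSavory dishes target → Spec_sweetAndSavory dishes target (sweetAndSavory dishes target)

-- ===== LEMMAS AND PROOFS =====

-- bisect_right on a sorted split: everything in xs is ≤ thr, everything in ys is > thr
theorem bisect_char (xs ys : List Int) (thr : Int)
    (h : (xs ++ ys).Pairwise (· ≤ ·))
    (hx : ∀ a ∈ xs, a ≤ thr) (hy : ∀ b ∈ ys, thr < b) :
    PySem.List.bisectRight (xs ++ ys) thr = xs.length := by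
  obtain ⟨hle, hsmall, hbig⟩ := PySem.List.bisectRight_spec (xs ++ ys) thr h
  set c := PySem.List.bisectRight (xs ++ ys) thr with hc
  rcases lt_trichotomy c xs.length with hlt | heq | hgt
  · exfalso
    have hcl : c < (xs ++ ys).length := by simp; omega
    have h1 := hbig c hcl (le_refl c)
    have h2 : (xs ++ ys)[c] = xs[c]'hlt := List.getElem_append_left hlt
    have h3 : xs[c]'hlt ∈ xs := List.getElem_mem _
    have := hx _ h3
    omega
  · exact heq
  · exfalso
    have hcl : xs.length < (xs ++ ys).length := by simp at hle ⊢; omega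
    have h1 := hsmall xs.length hcl hgt
    have h2 : (xs ++ ys)[xs.length] = ys[0]'(by simp at hcl; omega) := by
      rw [List.getElem_append_right (le_refl xs.length)]
      simp
    have h3 : ys[0]'(by simp at hcl; omega) ∈ ys := List.getElem_mem _
    have := hy _ h3
    omega

theorem foldl_no_update (R : List Int) (target : Int) :
    ∀ (vs : List Int) (st : List Int × Option Int),
      (∀ v ∈ vs, PySem.List.bisectRight R (target - v) = 0) →
      vs.foldl (altStep R target) st = st := by
  intro vs
  induction vs with
  | nil => intro st _; rfl
  | cons v vs ih =>
      intro st h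
      have h0 : altStep R target st v = st := by
        simp [altStep, h v (by simp)]
      rw [List.foldl_cons, h0]
      exact ih st (fun v' hv' => h v' (by simp [hv']))

-- main invariant: A's loop on the suffixes (ss, vs) equals B's fold over vs,
-- provided every already-skipped sweet (in P) overshoots every remaining savory
theorem loop_eq (target : Int) (S R : List Int)
    (hR : R = S.reverse) (hS : S.Pairwise (· ≥ ·)) :
    ∀ (n : Nat) (ss vs P best : List Int) (bd : Option Int),
      ss.length + vs.length = n →
      S = P ++ ss →
      (∀ p ∈ P, ∀ v ∈ vs, target < p + v) →
      vs.Pairwise (· ≤ ·) →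
      sweetAndSavoryLoop target ss vs best bd = (vs.foldl (altStep R target) (best, bd)).1 := by
  have hRpair : R.Pairwise (· ≤ ·) := by
    rw [hR]; exact List.pairwise_reverse.mpr hS
  intro n
  induction n using Nat.strong_induction_on with
  | _ n ih =>
    intro ss vs P best bd hn hSeq hP hvs
    rcases ss with _ | ⟨s, ss'⟩
    · -- no sweets left: every remaining savory finds nothing (all of S overshoots)
      have hb : ∀ v ∈ vs, PySem.List.bisectRight R (target - v) = 0 := by
        intro v hv
        have hy : ∀ b ∈ R, target - v < b := by
          intro b hb
          have hbS : b ∈ S := by rw [hR] at hb; exact List.mem_reverse.mp hb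
          have hbP : b ∈ P := by rw [hSeq] at hbS; simpa using hbS
          have := hP b hbP v hv
          omega
        have := bisect_char [] R (target - v) (by simpa using hRpair) (by simp) hy
        simpa using this
      rw [foldl_no_update R target vs (best, bd) hb]
      simp [sweetAndSavoryLoop]
    · rcases vs with _ | ⟨v, vs'⟩
      · simp [sweetAndSavoryLoop]
      · have hRdecomp : R = (ss'.reverse ++ [s]) ++ P.reverse := by
          rw [hR, hSeq]; simp
        have hsv_pair : (s :: ss').Pairwise (· ≥ ·) := by
          rw [hSeq] at hS
          exact (List.pairwise_append.mp hS).2.1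
        by_cases hcase : v + s ≤ target
        · -- this savory fits with the current sweet
          have hx : ∀ a ∈ ss'.reverse ++ [s], a ≤ target - v := by
            intro a ha
            simp [List.mem_append, List.mem_reverse] at ha
            rcases ha with ha | rfl
            · have := (List.pairwise_cons.mp hsv_pair).1 a ha
              omega
            · omega
          have hy : ∀ b ∈ P.reverse, target - v < b := by
            intro b hb
            have := hP b (List.mem_reverse.mp hb) v (by simp)
            omega
          have hbis : PySem.List.bisectRight R (target - v) = ss'.length + 1 := by
            have := bisect_char (ss'.reverse ++ [s]) P.reverse (target - v)
              (by rw [← hRdecomp]; exact hRpair) hx hy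
            rw [hRdecomp, this]; simp
          have hget : R.getD (ss'.length + 1 - 1) 0 = s := by
            rw [hRdecomp]
            have h1 : ss'.length + 1 - 1 = ss'.length := rfl
            rw [h1]
            rw [List.getD_append _ _ _ _ (by simp)]
            rw [List.getD_append_right _ _ _ _ (by simp)]
            simp
          have hdiff : target - v - s = target - (v + s) := by ring
          have hstep : altStep R target (best, bd) v =
              (match bd with
               | none => ([s, v], some (target - (v + s)))
               | some b => if target - (v + s) < b then ([s, v], some (target - (v + s))) else (best, bd)) := by
            simp only [altStep, hbis, hget, hdiff]
            norm_num
          have hP' : ∀ p ∈ P, ∀ v' ∈ vs', target < p + v' := by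
            intro p hp v' hv'; exact hP p hp v' (by simp [hv'])
          have hvs' : vs'.Pairwise (· ≤ ·) := (List.pairwise_cons.mp hvs).2
          rw [List.foldl_cons, hstep]
          show sweetAndSavoryLoop target (s :: ss') (v :: vs') best bd = _
          rw [sweetAndSavoryLoop]
          simp only [hcase, if_pos]
          rcases bd with _ | b
          · simp only []
            exact ih (ss'.length + 1 + vs'.length) (by simp at hn; omega)
              (s :: ss') vs' P _ _ (by simp) hSeq hP' hvs'
          · by_cases hlt : target - (v + s) < b
            · simp only [hlt, decide_true, if_true]
              exact ih (ss'.length + 1 + vs'.length) (by simp at hn; omega)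
                (s :: ss') vs' P _ _ (by simp) hSeq hP' hvs'
            · simp only [hlt, decide_false, if_false, Bool.false_eq_true]
              exact ih (ss'.length + 1 + vs'.length) (by simp at hn; omega)
                (s :: ss') vs' P _ _ (by simp) hSeq hP' hvs'
        · -- current sweet overshoots even the smallest remaining savory: skip it
          have hP' : ∀ p ∈ P ++ [s], ∀ v' ∈ v :: vs', target < p + v' := by
            intro p hp v' hv'
            have hvv' : v ≤ v' := by
              rcases List.mem_cons.mp hv' with rfl | hv'
              · exact le_rfl
              · exact (List.pairwise_cons.mp hvs).1 v' hv'
            rcases List.mem_append.mp hp with hp | hp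
            · exact hP p hp v' hv'
            · have : p = s := by simpa using hp
              omega
          show sweetAndSavoryLoop target (s :: ss') (v :: vs') best bd = _
          rw [sweetAndSavoryLoop]
          simp only [hcase, if_false]
          exact ih (ss'.length + (vs'.length + 1)) (by simp at hn; omega)
            ss' (v :: vs') (P ++ [s]) best bd (by simp)
            (by rw [hSeq]; simp) hP' hvs

-- ===== VERDICT (by name: the statement is the Claim_ definition above) =====
theorem sweetAndSavory_spec : Claim_equal_sweetAndSavory := by
  intro dishes target _
  unfold Spec_sweetAndSavory sweetAndSavory sweetAndSavory_alt
  show sweetAndSavoryLoop target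
      (PySem.List.sorted (dishes.filter (fun dish => decide (dish < 0))) (fun dish => |dish|) false)
      (PySem.List.sorted (dishes.filter (fun dish => decide (dish > 0))) (fun dish => dish) false)
      [0, 0] none = _
  set M := dishes.filter (fun dish => decide (dish < 0)) with hM
  set S := PySem.List.sorted M (fun dish => |dish|) false with hSdef
  set R := PySem.List.sorted M (fun dish => dish) false with hRdef
  set V := PySem.List.sorted (dishes.filter (fun dish => decide (dish > 0))) (fun dish => dish) false with hVdef
  have hSneg : ∀ x ∈ S, x < 0 := by
    intro x hx
    have hxM : x ∈ M := (PySem.List.mem_sorted _ _ _ _).mp hx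
    rw [hM] at hxM
    simpa using (List.mem_filter.mp hxM).2
  have hSpair : S.Pairwise (· ≥ ·) := by
    have h := PySem.List.sorted_pairwise (xs := M) (key := fun dish => |dish|)
    rw [← hSdef] at h
    refine List.Pairwise.imp_of_mem ?_ h
    intro a b ha hb hab
    have := hSneg a ha
    have := hSneg b hb
    simp only [abs_of_neg, *] at hab ⊢
    omega
  have hRrev : R = S.reverse := by
    apply PySem.List.eq_of_perm_of_pairwise_le_of_injective (fun x => x) (fun a b h => h)
    · exact (PySem.List.sorted_perm _ _ _).trans ((List.reverse_perm S).trans (PySem.List.sorted_perm _ _ _)).symm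
    · have h := PySem.List.sorted_pairwise (xs := M) (key := fun dish => dish)
      rw [← hRdef] at h
      exact h
    · exact List.pairwise_reverse.mpr hSpair
  have hV : V.Pairwise (· ≤ ·) := by
    have h := PySem.List.sorted_pairwise (xs := dishes.filter (fun dish => decide (dish > 0))) (key := fun dish => dish)
    rw [← hVdef] at h
    exact h
  exact loop_eq target S R hRrev hSpair (S.length + V.length) S V [] [0, 0] none rfl
    (by simp) (by simp) hV
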